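-- pv_equiv track=rewrite | github.com/siawase17/Algorithm-Study | week 7.py | dfs
-- ===== SOURCE A (Python) =====
-- def dfs(graph, start):
--     visited = set()
--     stack = [start]
--     result = []
--
--     while stack:
--         current_node = stack.pop()
--         if current_node not in visited:
--             visited.add(current_node)
--             result.append(current_node)
--             stack.extend(sorted(graph[current_node], reverse=True))
-- 						# 내림차순 정렬
--
--     return result
-- ===== SOURCE B (Python) =====
-- def dfs(graph, start):
--     visited = set()
--     result = []
--
--     def visit(node):
--         if node in visited:
--             return
--         visited.add(node)
--         result.append(node)
--         for neighbor in sorted(graph[node]):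
--             visit(neighbor)
--
--     visit(start)
--     return result
-- ===== Notes on version B (the rewrite author's own statement) =====
-- stated objective: alternative
-- what changed: Replaces A's explicit-stack loop (reverse-sorted pushes, pop-time visited check, stale entries tolerated on the stack) with a recursive visit helper over a shared visited set that iterates neighbours in plain ascending sorted order; the orders are proved identical.
-- outside the precondition, e.g. on dfs({1: [2], 2: [], 3: [5]}, 1): A returns [1, 2], B returns [1, 2]
import Mathlib
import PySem

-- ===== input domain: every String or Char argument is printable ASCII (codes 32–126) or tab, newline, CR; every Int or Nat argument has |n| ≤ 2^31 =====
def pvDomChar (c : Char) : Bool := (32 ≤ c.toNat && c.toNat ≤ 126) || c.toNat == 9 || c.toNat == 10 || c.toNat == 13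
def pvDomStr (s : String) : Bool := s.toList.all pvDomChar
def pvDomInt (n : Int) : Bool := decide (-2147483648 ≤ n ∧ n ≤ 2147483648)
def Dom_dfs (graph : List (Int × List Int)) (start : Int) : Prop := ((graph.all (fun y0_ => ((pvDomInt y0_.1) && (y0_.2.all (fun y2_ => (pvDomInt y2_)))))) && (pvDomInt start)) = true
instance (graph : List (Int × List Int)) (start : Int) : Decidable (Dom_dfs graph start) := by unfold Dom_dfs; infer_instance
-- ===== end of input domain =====

-- B replaces A's explicit stack (reverse-sorted pushes, pop-time visited check) by a recursive
-- visit over ascending-sorted neighbours; objective: alternative decomposition, same order proved equal.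

-- ===== PORT A =====
-- graph[n]: Python raises KeyError when n is not a key; inside Pre_dfs the lookup always
-- succeeds, so the total form (getD []) agrees with Python on every admitted input.
def pvAdj (g : List (Int × List Int)) (n : Int) : List Int :=
  ((PySem.Dict.mk g).get? n).getD []

-- measure helpers for the while-loop's termination (not part of the algorithm)
def pvS (g : List (Int × List Int)) : Nat := (g.map (fun p => p.2.length)).sum

def pvUnvis (g : List (Int × List Int)) (v : PySem.Set Int) : Nat :=
  ((g.map (fun p => p.1)).filter (fun k => ! v.contains k)).length

theorem pvFilterLenMono {l : List Int} {p q : Int → Bool}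
    (h : ∀ x ∈ l, p x = true → q x = true) :
    (l.filter p).length ≤ (l.filter q).length := by
  induction l with
  | nil => simp
  | cons a l ih =>
    have ih' := ih (fun x hx => h x (List.mem_cons_of_mem a hx))
    by_cases hp : p a = true
    · simp [hp, h a (List.mem_cons_self) hp]; omega
    · simp only [List.filter_cons, Bool.not_eq_true] at hp ⊢
      rw [hp]
      by_cases hq : q a = true <;> simp [hq] <;> omega

theorem pvFilterLenLt {l : List Int} {p q : Int → Bool}
    (h : ∀ x ∈ l, p x = true → q x = true)
    {a : Int} (ha : a ∈ l) (hpa : p a = false) (hqa : q a = true) :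
    (l.filter p).length < (l.filter q).length := by
  induction l with
  | nil => simp at ha
  | cons b l ih =>
    have hmono := pvFilterLenMono (fun x hx => h x (List.mem_cons_of_mem b hx))
    rcases List.mem_cons.mp ha with rfl | ha'
    · simp [hpa, hqa]; omega
    · have := ih (fun x hx => h x (List.mem_cons_of_mem b hx)) ha'
      by_cases hp : p b = true
      · simp [hp, h b (List.mem_cons_self) hp]; omega
      · simp only [List.filter_cons, Bool.not_eq_true] at hp ⊢
        rw [hp]
        by_cases hq : q b = true <;> simp [hq] <;> omega

theorem pvContainsAdd (v : PySem.Set Int) (n x : Int) (h : v.contains x = true) :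
    (v.add n).contains x = true := by
  rw [PySem.Set.contains_iff] at h ⊢
  exact (PySem.Set.mem_add v n x).mpr (Or.inl h)

theorem pvContainsAddSelf (v : PySem.Set Int) (n : Int) : (v.add n).contains n = true := by
  rw [PySem.Set.contains_iff]
  exact (PySem.Set.mem_add v n n).mpr (Or.inr rfl)

theorem pvUnvisAddLe (g : List (Int × List Int)) (v : PySem.Set Int) (n : Int) :
    pvUnvis g (v.add n) ≤ pvUnvis g v := by
  apply pvFilterLenMono
  intro x _ hx
  simp only [Bool.not_eq_true'] at hx ⊢
  by_contra hc
  simp only [Bool.not_eq_false] at hc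
  rw [pvContainsAdd v n x hc] at hx
  exact absurd hx (by simp)

theorem pvUnvisAddLt (g : List (Int × List Int)) (v : PySem.Set Int) (n : Int)
    (hk : n ∈ g.map (fun p => p.1)) (hn : v.contains n = false) :
    pvUnvis g (v.add n) < pvUnvis g v := by
  have hmono : ∀ x ∈ g.map (fun p => p.1),
      (! (v.add n).contains x) = true → (! v.contains x) = true := by
    intro x _ hx
    simp only [Bool.not_eq_true'] at hx ⊢
    by_contra hc
    simp only [Bool.not_eq_false] at hc
    rw [pvContainsAdd v n x hc] at hx
    exact absurd hx (by simp)
  have hpa : (! (v.add n).contains n) = false := by rw [pvContainsAddSelf]; rfl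
  have hqa : (! v.contains n) = true := by rw [hn]; rfl
  exact pvFilterLenLt hmono hk hpa hqa

theorem pvAdjLenLe (g : List (Int × List Int)) (n : Int) : (pvAdj g n).length ≤ pvS g := by
  induction g with
  | nil => simp [pvAdj, pvS, PySem.Dict.get?]
  | cons p g ih =>
    by_cases h : p.1 == n
    · simp only [pvAdj, pvS] at *
      rw [show (PySem.Dict.mk (p :: g)) = PySem.Dict.mk ((p.1, p.2) :: g) by rfl,
        PySem.Dict.get?_mk_cons, if_pos h]
      simp
    · simp only [pvAdj, pvS] at *
      rw [show (PySem.Dict.mk (p :: g)) = PySem.Dict.mk ((p.1, p.2) :: g) by rfl,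
        PySem.Dict.get?_mk_cons, if_neg (by simpa using h)]
      simp
      omega

theorem pvAdjNil (g : List (Int × List Int)) (n : Int) (hk : n ∉ g.map (fun p => p.1)) :
    pvAdj g n = [] := by
  unfold pvAdj
  rw [(PySem.Dict.get?_eq_none_iff_not_mem_keys _ _).mpr (by simpa [PySem.Dict.keys] using hk)]
  rfl

theorem pvMeasureLt (g : List (Int × List Int)) (v : PySem.Set Int) (n : Int) (t : List Int)
    (hn : v.contains n = false) :
    ((PySem.List.sorted (pvAdj g n) (fun x => x) true).reverse ++ t).length
      + (pvS g + 1) * pvUnvis g (v.add n)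
    < (n :: t).length + (pvS g + 1) * pvUnvis g v := by
  by_cases hk : n ∈ g.map (fun p => p.1)
  · have h1 : pvUnvis g (v.add n) + 1 ≤ pvUnvis g v := pvUnvisAddLt g v n hk hn
    have h2 := Nat.mul_le_mul_left (pvS g + 1) h1
    have h3 : (pvAdj g n).length ≤ pvS g := pvAdjLenLe g n
    simp only [List.length_append, List.length_reverse, PySem.List.length_sorted,
      List.length_cons]
    rw [Nat.mul_add, Nat.mul_one] at h2
    omega
  · have h1 := pvUnvisAddLe g v n
    have h2 := Nat.mul_le_mul_left (pvS g + 1) h1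
    rw [pvAdjNil g n hk]
    simp only [List.length_append, List.length_reverse, PySem.List.length_sorted,
      List.length_cons, List.length_nil]
    omega

-- the while loop of A, stack held top-first (Python's stack.pop() pops the end,
-- stack.extend(sorted(..., reverse=True)) pushes the reverse-sorted neighbours,
-- so top-first the pushed block is (sorted desc).reverse)
def dfsLoop (g : List (Int × List Int)) (v : PySem.Set Int) (r : List Int) (s : List Int) :
    List Int :=
  match s with
  | [] => r
  | n :: s' =>
    if v.contains n then dfsLoop g v r s'
    else dfsLoop g (v.add n) (r ++ [n])
      ((PySem.List.sorted (pvAdj g n) (fun x => x) true).reverse ++ s')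
  termination_by s.length + (pvS g + 1) * pvUnvis g v
  decreasing_by
  · simp only [List.length_cons]; omega
  · exact pvMeasureLt g v n s' (by simpa using ‹¬ v.contains n = true›)

def dfs (graph : List (Int × List Int)) (start : Int) : List Int :=
  dfsLoop graph PySem.Set.empty [] [start]

-- ===== PORT B =====
-- Source B's recursive visit; the Nat fuel only bounds the recursion depth (Lean totality device);
-- graph.length + 2 is proved sufficient (never exhausted), see pvVisitFuelIrrel/pvMain below.
def visitB (g : List (Int × List Int)) : Nat → Int → PySem.Set Int × List Int →
    PySem.Set Int × List Int
  | 0, _, st => st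
  | f + 1, n, st =>
    if st.1.contains n then st
    else (PySem.List.sorted (pvAdj g n) (fun x => x) false).foldl
      (fun acc m => visitB g f m acc) (st.1.add n, st.2 ++ [n])

def dfs_alt (graph : List (Int × List Int)) (start : Int) : List Int :=
  (visitB graph (graph.length + 2) start (PySem.Set.empty, [])).2

-- ===== PRECONDITION & SPEC =====
-- Pre_dfs excludes inputs where start or some listed neighbour is not a key of graph: Python's
-- graph[node] raises KeyError when such a node is reached; for a missing neighbour that is
-- unreachable from start A still returns (and B agrees there), but reachability is not a
-- closed-form condition, so Pre_dfs conservatively requires every listed node to be a key.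
def Pre_dfs (graph : List (Int × List Int)) (start : Int) : Prop :=
  start ∈ graph.map (fun p => p.1) ∧
  ∀ p ∈ graph, ∀ m ∈ p.2, m ∈ graph.map (fun q => q.1)
instance (graph : List (Int × List Int)) (start : Int) : Decidable (Pre_dfs graph start) := by
  unfold Pre_dfs; infer_instance

def pvWitness_dfs : (List (Int × List Int)) × Int := ([(1, [2, 3]), (2, [3]), (3, [1])], 1)

def Spec_dfs (graph : List (Int × List Int)) (start : Int) (out : List Int) : Prop :=
  out = dfs_alt graph start
instance (graph : List (Int × List Int)) (start : Int) (out : List Int) :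
    Decidable (Spec_dfs graph start out) := by unfold Spec_dfs; infer_instance

-- ===== CLAIM (what is proved, stated in full; the proofs are below) =====
def Claim_equal_dfs : Prop := ∀ (graph : List (Int × List Int)) (start : Int),
  Dom_dfs graph start → Pre_dfs graph start → Spec_dfs graph start (dfs graph start)

-- ===== LEMMAS AND PROOFS =====

-- reverse of a descending stable sort of integers is the ascending sort
theorem pvSortedRevReverse (l : List Int) :
    (PySem.List.sorted l (fun x => x) true).reverse = PySem.List.sorted l (fun x => x) false := by
  symm
  apply PySem.List.sorted_id_eq_of_perm_of_pairwise
  · exact (List.reverse_perm _).trans (PySem.List.sorted_perm l (fun x => x) true)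
  · exact List.pairwise_reverse.mpr (PySem.List.sorted_pairwise_rev l (fun x => x))

def pvFoldVisit (g : List (Int × List Int)) (f : Nat) (st : PySem.Set Int × List Int)
    (l : List Int) : PySem.Set Int × List Int :=
  l.foldl (fun acc m => visitB g f m acc) st

-- visited only grows through visit
theorem pvVisitGrows (g : List (Int × List Int)) :
    ∀ f n st x, x ∈ st.1 → x ∈ (visitB g f n st).1 := by
  intro f
  induction f with
  | zero => intro n st x h; simpa [visitB] using h
  | succ f ih =>
    intro n st x h
    simp only [visitB]
    split
    · exact h
    · have fold : ∀ (l : List Int) (st' : PySem.Set Int × List Int), x ∈ st'.1 →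
          x ∈ (l.foldl (fun acc m => visitB g f m acc) st').1 := by
        intro l
        induction l with
        | nil => intro st' h'; simpa using h'
        | cons a l ihl => intro st' h'; exact ihl _ (ih a st' x h')
      exact fold _ _ ((PySem.Set.mem_add st.1 n x).mpr (Or.inl h))

theorem pvUnvisMono (g : List (Int × List Int)) (v w : PySem.Set Int)
    (h : ∀ x ∈ v, x ∈ w) : pvUnvis g w ≤ pvUnvis g v := by
  apply pvFilterLenMono
  intro x _ hx
  simp only [Bool.not_eq_true'] at hx ⊢
  by_contra hc
  simp only [Bool.not_eq_false] at hc
  rw [(PySem.Set.contains_iff w x).mpr (h x ((PySem.Set.contains_iff v x).mp hc))] at hx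
  exact absurd hx (by simp)

-- fuel does not matter once it exceeds the number of unvisited keys
theorem pvVisitFuelIrrel (g : List (Int × List Int)) :
    ∀ N n st f1 f2, pvUnvis g st.1 ≤ N → pvUnvis g st.1 < f1 → pvUnvis g st.1 < f2 →
      visitB g f1 n st = visitB g f2 n st := by
  intro N
  induction N using Nat.strong_induction_on with
  | _ N ih =>
    intro n st f1 f2 hN h1 h2
    match f1, f2 with
    | a + 1, b + 1 =>
      simp only [visitB]
      split
      · rfl
      · by_cases hk : n ∈ g.map (fun p => p.1)
        · have hlt : pvUnvis g (st.1.add n) < pvUnvis g st.1 :=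
            pvUnvisAddLt g st.1 n hk (by simpa using ‹¬ st.1.contains n = true›)
          have hMN : pvUnvis g (st.1.add n) < N := lt_of_lt_of_le hlt hN
          have fold : ∀ (l : List Int) (st' : PySem.Set Int × List Int),
              pvUnvis g st'.1 ≤ pvUnvis g (st.1.add n) →
              l.foldl (fun acc m => visitB g a m acc) st'
                = l.foldl (fun acc m => visitB g b m acc) st' := by
            intro l
            induction l with
            | nil => intro st' _; rfl
            | cons c l ihl =>
              intro st' hst'
              have hc : visitB g a c st' = visitB g b c st' := by
                apply ih _ hMN c st'
                · exact hst'
                · omega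
                · omega
              rw [List.foldl_cons, List.foldl_cons, hc]
              apply ihl
              calc pvUnvis g (visitB g b c st').1
                  ≤ pvUnvis g st'.1 := pvUnvisMono g _ _ (fun x hx => pvVisitGrows g b c st' x hx)
                _ ≤ _ := hst'
          exact fold _ _ (le_refl _)
        · rw [pvAdjNil g n hk]
          rfl

theorem pvFoldFuelIrrel (g : List (Int × List Int)) :
    ∀ l st f1 f2 M, pvUnvis g st.1 ≤ M → M < f1 → M < f2 →
      pvFoldVisit g f1 st l = pvFoldVisit g f2 st l := by
  intro l
  induction l with
  | nil => intro st f1 f2 M _ _ _; rfl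
  | cons c l ih =>
    intro st f1 f2 M hM h1 h2
    have hc : visitB g f1 c st = visitB g f2 c st :=
      pvVisitFuelIrrel g M c st f1 f2 hM (by omega) (by omega)
    simp only [pvFoldVisit, List.foldl_cons] at *
    rw [hc]
    apply ih _ f1 f2 M _ h1 h2
    calc pvUnvis g (visitB g f2 c st).1
        ≤ pvUnvis g st.1 := pvUnvisMono g _ _ (fun x hx => pvVisitGrows g f2 c st x hx)
      _ ≤ M := hM

-- MAIN: running the stack loop on s₁ ++ s₂ first performs the recursive visits of s₁
theorem pvMain (g : List (Int × List Int)) :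
    ∀ N (v : PySem.Set Int) (r : List Int) (s₁ s₂ : List Int) (f : Nat),
      s₁.length + (pvS g + 1) * pvUnvis g v ≤ N → pvUnvis g v < f →
      dfsLoop g v r (s₁ ++ s₂)
        = dfsLoop g (pvFoldVisit g f (v, r) s₁).1 (pvFoldVisit g f (v, r) s₁).2 s₂ := by
  intro N
  induction N using Nat.strong_induction_on with
  | _ N ih =>
    intro v r s₁ s₂ f hN hf
    match s₁ with
    | [] => rfl
    | n :: t =>
      match f, hf with
      | f' + 1, hf =>
        rw [List.cons_append, dfsLoop]
        by_cases h : v.contains n = true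
        · rw [if_pos h]
          have hstep : pvFoldVisit g (f' + 1) (v, r) (n :: t)
              = pvFoldVisit g (f' + 1) (v, r) t := by
            simp only [pvFoldVisit, List.foldl_cons, visitB, h, if_pos]
          rw [hstep]
          apply ih (t.length + (pvS g + 1) * pvUnvis g v) (by simp at hN; omega) v r t s₂
            (f' + 1) (le_refl _) hf
        · rw [if_neg h]
          have hfalse : v.contains n = false := by simpa using h
          have hmeas := pvMeasureLt g v n t hfalse
          have hrw : (PySem.List.sorted (pvAdj g n) (fun x => x) true).reverse ++ (t ++ s₂)
              = (PySem.List.sorted (pvAdj g n) (fun x => x) false ++ t) ++ s₂ := by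
            rw [pvSortedRevReverse, List.append_assoc]
          rw [hrw]
          have hfv : pvUnvis g (v.add n) < f' + 1 :=
            lt_of_le_of_lt (pvUnvisAddLe g v n) hf
          have hNv : (PySem.List.sorted (pvAdj g n) (fun x => x) false ++ t).length
              + (pvS g + 1) * pvUnvis g (v.add n) < N := by
            have : (PySem.List.sorted (pvAdj g n) (fun x => x) false ++ t).length
                = ((PySem.List.sorted (pvAdj g n) (fun x => x) true).reverse ++ t).length := by
              simp
            rw [this]
            omega
          rw [ih _ hNv (v.add n) (r ++ [n]) _ s₂ (f' + 1) (le_refl _) hfv]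
          have hsplit : pvFoldVisit g (f' + 1) (v.add n, r ++ [n])
              (PySem.List.sorted (pvAdj g n) (fun x => x) false ++ t)
              = pvFoldVisit g (f' + 1)
                  (pvFoldVisit g (f' + 1) (v.add n, r ++ [n])
                    (PySem.List.sorted (pvAdj g n) (fun x => x) false)) t := by
            simp [pvFoldVisit, List.foldl_append]
          have hvb : visitB g (f' + 1) n (v, r)
              = pvFoldVisit g f' (v.add n, r ++ [n])
                  (PySem.List.sorted (pvAdj g n) (fun x => x) false) := by
            simp only [visitB, hfalse]
            rfl
          have hfuel : pvFoldVisit g f' (v.add n, r ++ [n])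
              (PySem.List.sorted (pvAdj g n) (fun x => x) false)
              = pvFoldVisit g (f' + 1) (v.add n, r ++ [n])
                  (PySem.List.sorted (pvAdj g n) (fun x => x) false) := by
            by_cases hk : n ∈ g.map (fun p => p.1)
            · have hlt : pvUnvis g (v.add n) < pvUnvis g v := pvUnvisAddLt g v n hk hfalse
              exact pvFoldFuelIrrel g _ _ f' (f' + 1) (pvUnvis g (v.add n)) (le_refl _)
                (by omega) (by omega)
            · rw [pvAdjNil g n hk]
              rfl
          have hcons : pvFoldVisit g (f' + 1) (v, r) (n :: t)
              = pvFoldVisit g (f' + 1) (visitB g (f' + 1) n (v, r)) t := by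
            simp [pvFoldVisit]
          rw [hsplit, hcons, hvb, hfuel]

theorem pvUnvisEmptyLt (g : List (Int × List Int)) :
    pvUnvis g PySem.Set.empty < g.length + 2 := by
  have h : ((g.map (fun p => p.1)).filter
      (fun k => ! (PySem.Set.empty : PySem.Set Int).contains k)).length
      ≤ (g.map (fun p => p.1)).length := List.length_filter_le _ _
  simp only [pvUnvis]
  simp at h ⊢

theorem pvEquiv (g : List (Int × List Int)) (start : Int) : dfs g start = dfs_alt g start := by
  unfold dfs dfs_alt
  have h := pvMain g (1 + (pvS g + 1) * pvUnvis g PySem.Set.empty) PySem.Set.empty [] [start] []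
    (g.length + 2) (by simp) (pvUnvisEmptyLt g)
  simp only [List.append_nil] at h
  rw [h, dfsLoop]
  simp [pvFoldVisit]

-- ===== VERDICT (by name: the statement is the Claim_ definition above) =====
theorem dfs_spec : Claim_equal_dfs := by
  intro graph start _ _
  unfold Spec_dfs
  exact pvEquiv graph start
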